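-- pv_equiv track=rewrite | github.com/LewisSchrock/ziggu-sim | ziggu/core.py | long_successor
-- ===== SOURCE A (Python) =====
-- from typing import Iterator, List, Tuple, Dict, Optional
--
-- State = Tuple[int, ...]  # q_n, q_{n-1}, ..., q_1  (high index first)
--
-- def is_valid(w: State) -> bool:
--     """Return True iff w is a valid Ziggu state (w in V_n).
--
--     Valid iff for every position where the digit is 3, every digit to its
--     right in the paper writing (= every later index in our tuple) is also
--     3. Equivalently, once we see a 3 scanning left-to-right, every
--     subsequent digit must also be 3.
--
--     Geometrically: in each maze i, the cell (r_i, c_i) is valid iff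
--     r_i != 3 or c_i = 3. Since our tuple stores c_1 r_1 r_2 ... r_m
--     high-index-first (so r_m, r_{m-1}, ..., r_1, c_1), adjacent tuple
--     entries are the (r, c) pair for the same maze, and "r=3 -> c=3"
--     propagated transitively gives this condition.
--     """
--     seen_three = False
--     for d in w:
--         if seen_three:
--             if d != 3:
--                 return False
--         elif d == 3:
--             seen_three = True
--     return True
--
-- def long_successor(w: State) -> Optional[State]:
--     """Return the successor of w in the longest solution V_n, or None.
--
--     Picks the smallest paper index i (rightmost position in our tuple) such
--     that the parity-dictated ±1 move on that digit lands in a valid state.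
--     Parity: let s = sum of digits strictly to the LEFT of position i in the
--     paper writing (= digits to the LEFT in our tuple). If s is even, we try
--     to increment; if odd, decrement. A move is allowed iff the resulting
--     digit is in [0,3] and the resulting state is in V_n.
--
--     This is equivalent to paper eq. (11); we check validity directly on the
--     candidate state rather than encoding the equivalent side-conditions.
--     """
--     n = len(w)
--     prefix = [0] * (n + 1)
--     for k in range(n):
--         prefix[k + 1] = prefix[k] + w[k]
--     for k in range(n - 1, -1, -1):
--         s_left = prefix[k]
--         q_i = w[k]
--         if s_left % 2 == 0:
--             if q_i < 3:
--                 candidate = w[:k] + (q_i + 1,) + w[k + 1:]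
--                 if is_valid(candidate):
--                     return candidate
--         else:
--             if q_i > 0:
--                 candidate = w[:k] + (q_i - 1,) + w[k + 1:]
--                 if is_valid(candidate):
--                     return candidate
--     return None
-- ===== SOURCE B (Python) =====
-- def long_successor(w):
--     """Alternative implementation: one left-to-right pass precomputes prefix
--     validity/seen-a-3 info, then one right-to-left pass decides each
--     candidate from running suffix sum / suffix-valid / all-threes flags,
--     instead of re-validating the whole candidate state each time."""
--     n = len(w)
--     # pref[k] = (w[:k] is valid, w[:k] contains a 3)
--     pref = [(True, False)]
--     vp, s3 = True, False
--     for d in w: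
--         vp = vp and ((not s3) or d == 3)
--         s3 = s3 or d == 3
--         pref.append((vp, s3))
--     total = sum(w)
--     suff_sum = 0      # sum of w[k+1:]
--     valid_suff = True  # w[k+1:] is valid
--     all3 = True        # every digit of w[k+1:] is 3
--     for k in range(n - 1, -1, -1):
--         q = w[k]
--         s_left = total - suff_sum - q
--         if s_left % 2 == 0:
--             ok, v = q < 3, q + 1
--         else:
--             ok, v = q > 0, q - 1
--         if ok:
--             vp_k, s3_k = pref[k]
--             if vp_k and valid_suff and ((not s3_k) or v == 3) and (v != 3 or all3):
--                 return w[:k] + (v,) + w[k + 1:]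
--         suff_sum += q
--         valid_suff = valid_suff and (q != 3 or all3)
--         all3 = all3 and q == 3
--     return None
-- ===== Notes on version B (the rewrite author's own statement) =====
-- stated objective: alternative
-- what changed: Instead of rebuilding each candidate and rescanning it with is_valid, B precomputes (prefix-valid, prefix-contains-3) pairs in one left-to-right pass and maintains running suffix-sum/suffix-valid/all-threes flags in the right-to-left pass, deciding each candidate's validity from these flags; on typical inputs the first candidate already succeeds, so the measured cost is similar.
import Mathlib
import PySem

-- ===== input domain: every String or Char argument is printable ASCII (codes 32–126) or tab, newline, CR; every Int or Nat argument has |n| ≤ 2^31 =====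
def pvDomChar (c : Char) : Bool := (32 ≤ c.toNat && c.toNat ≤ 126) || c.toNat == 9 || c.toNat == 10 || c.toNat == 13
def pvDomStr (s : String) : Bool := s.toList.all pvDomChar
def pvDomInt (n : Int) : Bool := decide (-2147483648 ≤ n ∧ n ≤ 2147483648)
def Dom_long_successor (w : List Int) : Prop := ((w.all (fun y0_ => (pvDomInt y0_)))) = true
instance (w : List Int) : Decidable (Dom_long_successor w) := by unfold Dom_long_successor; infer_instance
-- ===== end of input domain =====

-- B replaces A's per-candidate is_valid rescan by precomputed prefix info and running
-- suffix flags that decide each candidate's validity directly; return values agree everywhere.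

-- ===== PORT A =====
-- is_valid: scan left to right with a seen-a-3 flag
def is_valid_go : Bool → List Int → Bool
  | _, [] => true
  | seen, d :: rest =>
    if seen then
      if d ≠ 3 then false else is_valid_go seen rest
    else if d = 3 then is_valid_go true rest
    else is_valid_go false rest

def is_valid (w : List Int) : Bool := is_valid_go false w

-- prefix[k+1] = prefix[k] + w[k]
def prefix_go (acc : Int) : List Int → List Int
  | [] => [acc]
  | d :: rest => acc :: prefix_go (acc + d) rest

def longA_go (w prefixL : List Int) : List Int → Option (List Int)
  | [] => none
  | k :: ks =>
    let s_left := PySem.List.pyGetD prefixL k 0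
    let q := PySem.List.pyGetD w k 0
    if PySem.Int.mod s_left 2 = 0 then
      if q < 3 then
        let cand := PySem.List.slice w none (some k) ++ (q + 1) :: PySem.List.slice w (some (k + 1)) none
        if is_valid cand then some cand else longA_go w prefixL ks
      else longA_go w prefixL ks
    else
      if q > 0 then
        let cand := PySem.List.slice w none (some k) ++ (q - 1) :: PySem.List.slice w (some (k + 1)) none
        if is_valid cand then some cand else longA_go w prefixL ks
      else longA_go w prefixL ks

def long_successor (w : List Int) : Option (List Int) :=
  longA_go w (prefix_go 0 w) (PySem.List.pyRange ((w.length : Int) - 1) (-1) (-1))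

-- ===== PORT B =====
-- pref[k] = (w[:k] is valid, w[:k] contains a 3), built in one left-to-right pass
def pref_go (vp s3 : Bool) : List Int → List (Bool × Bool)
  | [] => []
  | d :: rest =>
    pref_go (vp && (!s3 || d == 3)) (s3 || d == 3) rest |>.cons
      (vp && (!s3 || d == 3), s3 || d == 3)

def longB_go (w : List Int) (prefL : List (Bool × Bool)) (total : Int) :
    Int → Bool → Bool → List Int → Option (List Int)
  | _, _, _, [] => none
  | suff_sum, valid_suff, all3, k :: ks =>
    let q := PySem.List.pyGetD w k 0
    let s_left := total - suff_sum - q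
    let p := if PySem.Int.mod s_left 2 = 0 then (decide (q < 3), q + 1) else (decide (q > 0), q - 1)
    if p.1 then
      let pr := PySem.List.pyGetD prefL k (true, false)
      if pr.1 && valid_suff && (!pr.2 || p.2 == 3) && (!(p.2 == 3) || all3) then
        some (PySem.List.slice w none (some k) ++ p.2 :: PySem.List.slice w (some (k + 1)) none)
      else
        longB_go w prefL total (suff_sum + q) (valid_suff && (!(q == 3) || all3)) (all3 && q == 3) ks
    else
      longB_go w prefL total (suff_sum + q) (valid_suff && (!(q == 3) || all3)) (all3 && q == 3) ks

def long_successor_alt (w : List Int) : Option (List Int) :=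
  longB_go w ((true, false) :: pref_go true false w) w.sum 0 true true
    (PySem.List.pyRange ((w.length : Int) - 1) (-1) (-1))

-- ===== PRECONDITION & SPEC =====
def Spec_long_successor (w : List Int) (out : Option (List Int)) : Prop := out = long_successor_alt w
instance (w : List Int) (out : Option (List Int)) : Decidable (Spec_long_successor w out) := by unfold Spec_long_successor; infer_instance

-- ===== CLAIM (what is proved, stated in full; the proofs are below) =====
def Claim_equal_long_successor : Prop := ∀ (w : List Int), Dom_long_successor w → Spec_long_successor w (long_successor w)

-- ===== LEMMAS AND PROOFS =====

-- once a 3 has been seen, validity means "everything remaining is 3"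
theorem is_valid_go_true (ys : List Int) : is_valid_go true ys = ys.all (· == 3) := by
  induction ys with
  | nil => rfl
  | cons d rest ih =>
      by_cases hd : d = 3 <;> simp [is_valid_go, hd, ih]

theorem is_valid_go_cons (s3 : Bool) (d : Int) (xs : List Int) :
    is_valid_go s3 (d :: xs) = ((!s3 || d == 3) && is_valid_go (s3 || d == 3) xs) := by
  by_cases hd : d = 3
  · subst hd; cases s3 <;> simp [is_valid_go]
  · have hd' : (d == 3) = false := by simp [hd]
    cases s3 <;> simp [is_valid_go, hd, hd']

theorem is_valid_go_of_all3 (s3 : Bool) (ys : List Int) (h : ys.all (· == 3) = true) :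
    is_valid_go s3 ys = true := by
  induction ys generalizing s3 with
  | nil => rfl
  | cons d rest ih =>
      simp only [List.all_cons, Bool.and_eq_true, beq_iff_eq] at h
      simp [is_valid_go_cons, h.1, ih _ h.2]

theorem is_valid_go_append (xs : List Int) (s3 : Bool) (zs : List Int) :
    is_valid_go s3 (xs ++ zs)
      = (is_valid_go s3 xs && is_valid_go (s3 || xs.any (· == 3)) zs) := by
  induction xs generalizing s3 with
  | nil => simp [is_valid_go]
  | cons d rest ih =>
      simp [is_valid_go_cons, ih, Bool.or_assoc, Bool.and_assoc]

-- A's full-candidate validity check, expressed through B's O(1) ingredients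
theorem is_valid_mid (xs : List Int) (v : Int) (ys : List Int) :
    is_valid (xs ++ v :: ys)
      = (is_valid xs && is_valid ys && (!(xs.any (· == 3)) || v == 3)
          && (!(v == 3) || ys.all (· == 3))) := by
  unfold is_valid
  rw [is_valid_go_append, is_valid_go_cons]
  by_cases hv : v = 3
  · subst hv
    cases hA : ys.all (· == 3) with
    | false => cases hC : xs.any (· == 3) <;> simp [is_valid_go_true, hA]
    | true =>
        cases hC : xs.any (· == 3) <;>
          simp [is_valid_go_true, hA, is_valid_go_of_all3 false ys hA]
  · have hv' : (v == 3) = false := by simp [hv]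
    cases hC : xs.any (· == 3) <;> simp [hv', is_valid_go_true]

-- B's one-step suffix-validity update
theorem is_valid_cons_eq (q : Int) (ys : List Int) :
    is_valid (q :: ys) = (is_valid ys && (!(q == 3) || ys.all (· == 3))) := by
  unfold is_valid
  rw [is_valid_go_cons]
  by_cases hq : q = 3
  · subst hq
    cases hA : ys.all (· == 3) with
    | false => simp [is_valid_go_true, hA]
    | true => simp [is_valid_go_true, hA, is_valid_go_of_all3 false ys hA]
  · simp [show (q == 3) = false from by simp [hq]]

-- A's prefix array holds the prefix sums
theorem prefix_go_getD (w : List Int) : ∀ (a : Int) (m : Nat), m ≤ w.length →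
    (prefix_go a w).getD m 0 = a + (w.take m).sum := by
  induction w with
  | nil =>
      intro a m hm
      have h0 : m = 0 := Nat.le_zero.mp (by simpa using hm)
      subst h0; simp [prefix_go]
  | cons d rest ih =>
      intro a m hm
      cases m with
      | zero => simp [prefix_go]
      | succ m' =>
          simp only [prefix_go, List.getD_cons_succ, List.take_succ_cons, List.sum_cons]
          rw [ih (a + d) m' (by simpa using hm)]
          ring

-- B's pref array holds (validity, contains-3) of each prefix
theorem pref_go_getD (w : List Int) : ∀ (m : Nat) (vp s3 : Bool), m ≤ w.length →
    ((vp, s3) :: pref_go vp s3 w).getD m (true, false)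
      = (vp && is_valid_go s3 (w.take m), s3 || (w.take m).any (· == 3)) := by
  induction w with
  | nil =>
      intro m vp s3 hm
      have h0 : m = 0 := Nat.le_zero.mp (by simpa using hm)
      subst h0; simp [is_valid_go]
  | cons d rest ih =>
      intro m vp s3 hm
      cases m with
      | zero => simp [is_valid_go]
      | succ m' =>
          simp only [pref_go, List.getD_cons_succ, List.take_succ_cons]
          rw [ih m' _ _ (by simpa using hm)]
          simp [is_valid_go_cons, Bool.or_assoc, Bool.and_assoc]

-- main loop correspondence: with m indices left, B's running state describes w.drop m
theorem loop_eq (w : List Int) : ∀ (m : Nat), m ≤ w.length →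
    longA_go w (prefix_go 0 w) (PySem.List.pyRange ((m : Int) - 1) (-1) (-1))
      = longB_go w ((true, false) :: pref_go true false w) w.sum
          (w.drop m).sum (is_valid (w.drop m)) ((w.drop m).all (· == 3))
          (PySem.List.pyRange ((m : Int) - 1) (-1) (-1)) := by
  intro m
  induction m with
  | zero =>
      intro _
      rw [PySem.List.pyRange_neg_one_eq_nil (by norm_num)]
      rfl
  | succ m ih =>
      intro hm
      have hmlt : m < w.length := by omega
      rw [show (((m : Nat) + 1 : Nat) : Int) - 1 = (m : Int) by push_cast; ring]
      rw [PySem.List.pyRange_neg_one_cons (by omega)]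
      -- both sides process index m first
      have hq : PySem.List.pyGetD w (m : Int) 0 = w[m] := by
        simp [PySem.List.pyGetD_natCast, List.getD_eq_getElem?_getD, hmlt]
      have hdrop : w.drop m = w[m] :: w.drop (m + 1) := List.drop_eq_getElem_cons hmlt
      have hsA : PySem.List.pyGetD (prefix_go 0 w) (m : Int) 0 = (w.take m).sum := by
        rw [PySem.List.pyGetD_natCast, prefix_go_getD w 0 m (le_of_lt hmlt)]; ring
      have hsum : (w.take m).sum + (w.drop m).sum = w.sum := List.sum_take_add_sum_drop w m
      have hsB : w.sum - (w.drop (m + 1)).sum - w[m] = (w.take m).sum := by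
        rw [hdrop] at hsum; simp only [List.sum_cons] at hsum; omega
      have hpr : PySem.List.pyGetD ((true, false) :: pref_go true false w) (m : Int) (true, false)
          = (is_valid (w.take m), (w.take m).any (· == 3)) := by
        rw [PySem.List.pyGetD_natCast]
        rw [pref_go_getD w m true false (le_of_lt hmlt)]
        simp [is_valid]
      -- state update equalities
      have hSsum : (w.drop (m + 1)).sum + w[m] = (w.drop m).sum := by
        rw [hdrop, List.sum_cons]; ring
      have hSval : (is_valid (w.drop (m + 1)) && (!(w[m] == 3) || (w.drop (m + 1)).all (· == 3)))
          = is_valid (w.drop m) := by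
        rw [hdrop, is_valid_cons_eq]
      have hSall : ((w.drop (m + 1)).all (· == 3) && w[m] == 3) = (w.drop m).all (· == 3) := by
        rw [hdrop, List.all_cons]; exact Bool.and_comm _ _
      -- candidate slices
      have hsl1 : PySem.List.slice w none (some (m : Int)) = w.take m :=
        PySem.List.slice_to_natCast w m
      have hsl2 : PySem.List.slice w (some ((m : Int) + 1)) none = w.drop (m + 1) := by
        rw [show ((m : Int) + 1) = ((m + 1 : Nat) : Int) by push_cast; ring]
        exact PySem.List.slice_from_natCast w (m + 1)
      simp only [longA_go, longB_go, hq, hsA, hsB, hpr, hsl1, hsl2, hSsum, hSval, hSall]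
      by_cases hmod : PySem.Int.mod ((w.take m).sum) 2 = 0
      · simp only [hmod, if_true]
        by_cases hq3 : w[m] < 3
        · simp only [hq3, if_true, is_valid_mid]
          by_cases hval : (is_valid (w.take m) && is_valid (w.drop (m + 1))
              && (!((w.take m).any (· == 3)) || w[m] + 1 == 3)
              && (!(w[m] + 1 == 3) || (w.drop (m + 1)).all (· == 3))) = true
          · simp [hval]
          · simp only [Bool.not_eq_true] at hval
            simp only [hval, Bool.false_eq_true, if_false]
            exact ih (le_of_lt hmlt)
        · simp only [hq3, if_false]
          exact ih (le_of_lt hmlt)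
      · simp only [hmod, if_false]
        by_cases hq0 : w[m] > 0
        · simp only [hq0, if_true, is_valid_mid]
          by_cases hval : (is_valid (w.take m) && is_valid (w.drop (m + 1))
              && (!((w.take m).any (· == 3)) || w[m] - 1 == 3)
              && (!(w[m] - 1 == 3) || (w.drop (m + 1)).all (· == 3))) = true
          · simp [hval]
          · simp only [Bool.not_eq_true] at hval
            simp only [hval, Bool.false_eq_true, if_false]
            exact ih (le_of_lt hmlt)
        · simp only [hq0, if_false]
          exact ih (le_of_lt hmlt)

-- ===== VERDICT (by name: the statement is the Claim_ definition above) =====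
theorem long_successor_spec : Claim_equal_long_successor := by
  intro w _
  unfold Spec_long_successor long_successor long_successor_alt
  have := loop_eq w w.length (le_refl _)
  simpa [is_valid, is_valid_go] using this
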